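-- pv_equiv track=rewrite | github.com/seven05/Jungle | jungle_week2/1day/2504.py | cal_stack
-- ===== SOURCE A (Python) =====
-- def cal_stack(data):
--     stack = []
--     for i in data:
--         if i == "(" or i == "[":  # 여는 괄호는 스택에추가
--             stack.append(i)
--         elif i == ")":          # 닫는 괄호따라서 x2 x3이 바껴야하므로 두개로 분리
--             if not stack:       # 비어있으면 0
--                 return 0
--             tmp = 0
--             while stack:
--                 top = stack.pop()
--                 if top == "(":     # 여는 괄호만나면 stack 계산값을 넣기
--                     stack.append(2 if tmp == 0 else tmp*2)  # () 이거는 2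
--                     break
--                 elif top == "[":    # 얘 만나면 잘못된거니깐 0
--                     return 0
--                 else:
--                     tmp += top
--             else:               # 앞에가 비어있으면 잘못된거
--                 return 0
--         elif i == "]":
--             if not stack:
--                 return 0
--             tmp = 0
--             while stack:
--                 top = stack.pop()
--                 if top == "[":
--                     stack.append(3 if tmp == 0 else tmp*3)  # [] 이거는 3
--                     break
--                 elif top == "(":
--                     return 0
--                 else:
--                     tmp += top
--             else:
--                 return 0
--     result = 0
--     for j in stack:     # 위에꺼 다돌고도 여는 괄호있으면 잘못된거니깐 확인
--         if j == '(' or j == '[':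
--             return 0
--         result += j     # 스택에 있는 숫자값들 다 더하기
--     return result
-- ===== SOURCE B (Python) =====
-- def cal_stack(data):
--     stack = []
--     tmp = 1
--     result = 0
--     leaf = False
--     for ch in data:
--         if ch == '(':
--             stack.append(ch)
--             tmp *= 2
--             leaf = True
--         elif ch == '[':
--             stack.append(ch)
--             tmp *= 3
--             leaf = True
--         elif ch == ')':
--             if not stack or stack[-1] != '(':
--                 return 0
--             if leaf:
--                 result += tmp
--             stack.pop()
--             tmp //= 2
--             leaf = False
--         elif ch == ']':
--             if not stack or stack[-1] != '[':
--                 return 0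
--             if leaf:
--                 result += tmp
--             stack.pop()
--             tmp //= 3
--             leaf = False
--     if stack:
--         return 0
--     return result
-- ===== Notes on version B (the rewrite author's own statement) =====
-- stated objective: alternative
-- what changed: B drops A's heterogeneous stack of open brackets and partial integer values (with an inner pop-and-resum while loop on every closing bracket) and instead computes the value top-down with a running depth multiplier, a result accumulator and an innermost-pair flag, keeping only open brackets on the stack.
import Mathlib
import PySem

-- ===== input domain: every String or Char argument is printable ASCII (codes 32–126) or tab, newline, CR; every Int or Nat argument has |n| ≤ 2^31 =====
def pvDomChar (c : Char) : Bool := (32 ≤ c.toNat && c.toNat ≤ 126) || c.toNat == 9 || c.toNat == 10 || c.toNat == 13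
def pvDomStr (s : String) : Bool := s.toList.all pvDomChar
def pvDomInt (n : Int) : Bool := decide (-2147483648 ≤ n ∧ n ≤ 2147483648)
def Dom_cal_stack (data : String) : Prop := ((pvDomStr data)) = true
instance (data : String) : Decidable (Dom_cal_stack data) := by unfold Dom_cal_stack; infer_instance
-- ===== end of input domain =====

-- B replaces A's heterogeneous stack (open brackets and partial int values, with an inner
-- pop-and-resum while loop per closing bracket) by a top-down scheme: a running depth
-- multiplier, a result accumulator and an innermost-pair flag (objective: alternative).

-- ===== PORT A =====
-- A's stack holds both open-bracket strings and ints; modelled by a sum-like inductive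
-- (op true = "(", op false = "[").
inductive AElem where
  | op : Bool → AElem
  | num : Int → AElem
deriving DecidableEq, Repr

-- the inner `while stack:` loop of A for a closing bracket; `b` = true for ')' (wants "("),
-- false for ']' (wants "[").  none = an early `return 0` (while-else or wrong open bracket).
def popLoopA (b : Bool) : List AElem → Int → Option (List AElem)
  | [], _ => none
  | AElem.op b' :: rest, tmp =>
      if b' = b then
        some (AElem.num (if tmp = 0 then (if b then 2 else 3)
                         else tmp * (if b then 2 else 3)) :: rest) -- push computed value, break
      else none                                                    -- mismatched open bracket
  | AElem.num n :: rest, tmp => popLoopA b rest (tmp + n)          -- tmp += top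

-- A's final `for j in stack:` loop (Python iterates bottom-to-top, hence called on reverse)
def finishA : List AElem → Int → Int
  | [], result => result
  | AElem.op _ :: _, _ => 0
  | AElem.num n :: rest, result => finishA rest (result + n)

def loopA : List Char → List AElem → Int
  | [], stack => finishA stack.reverse 0
  | c :: cs, stack =>
      if c = '(' then loopA cs (AElem.op true :: stack)
      else if c = '[' then loopA cs (AElem.op false :: stack)
      else if c = ')' then
        match popLoopA true stack 0 with
        | none => 0
        | some s => loopA cs s
      else if c = ']' then
        match popLoopA false stack 0 with
        | none => 0
        | some s => loopA cs s
      else loopA cs stack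

def cal_stack (data : String) : Int := loopA data.toList []

-- ===== PORT B =====
def loopB : List Char → List Char → Int → Int → Bool → Int
  | [], stack, _, result, _ => if stack.isEmpty then result else 0
  | c :: cs, stack, tmp, result, leaf =>
      if c = '(' then loopB cs ('(' :: stack) (tmp * 2) result true
      else if c = '[' then loopB cs ('[' :: stack) (tmp * 3) result true
      else if c = ')' then
        match stack with
        | '(' :: rest => loopB cs rest (PySem.Int.floordiv tmp 2)
            (if leaf then result + tmp else result) false
        | _ => 0
      else if c = ']' then
        match stack with
        | '[' :: rest => loopB cs rest (PySem.Int.floordiv tmp 3)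
            (if leaf then result + tmp else result) false
        | _ => 0
      else loopB cs stack tmp result leaf

def cal_stack_alt (data : String) : Int := loopB data.toList [] 1 0 false

-- ===== PRECONDITION & SPEC =====
def Spec_cal_stack (data : String) (out : Int) : Prop := out = cal_stack_alt data
instance (data : String) (out : Int) : Decidable (Spec_cal_stack data out) := by unfold Spec_cal_stack; infer_instance

-- ===== CLAIM (what is proved, stated in full; the proofs are below) =====
def Claim_equal_cal_stack : Prop := ∀ (data : String), Dom_cal_stack data → Spec_cal_stack data (cal_stack data)

-- ===== LEMMAS AND PROOFS =====

-- abstraction functions from A's stack to B's state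
def opens : List AElem → List Char
  | [] => []
  | AElem.op b :: rest => (if b then '(' else '[') :: opens rest
  | AElem.num _ :: rest => opens rest

def wprod : List Char → Int
  | [] => 1
  | c :: rest => (if c = '(' then 2 else 3) * wprod rest

def valA : List AElem → Int
  | [] => 0
  | AElem.op _ :: rest => valA rest
  | AElem.num n :: rest => n * wprod (opens rest) + valA rest

def headIsOp : List AElem → Bool
  | AElem.op _ :: _ => true
  | _ => false

def numPrefixSum : List AElem → Int
  | AElem.num n :: rest => n + numPrefixSum rest
  | _ => 0

def afterNums : List AElem → List AElem
  | AElem.num _ :: rest => afterNums rest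
  | S => S

def sumNums : List AElem → Int
  | [] => 0
  | AElem.op _ :: rest => sumNums rest
  | AElem.num n :: rest => n + sumNums rest

def PosNums (S : List AElem) : Prop := ∀ n : Int, AElem.num n ∈ S → 0 < n

theorem valA_decomp (S : List AElem) :
    valA S = numPrefixSum S * wprod (opens S) + valA (afterNums S) := by
  induction S with
  | nil => simp [valA, numPrefixSum, afterNums]
  | cons e rest ih => cases e with
      | op b => simp [valA, numPrefixSum, afterNums]
      | num n =>
          simp only [valA, numPrefixSum, afterNums, opens, ih]
          ring

theorem numPrefixSum_nonneg (S : List AElem) (h : PosNums S) : 0 ≤ numPrefixSum S := by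
  induction S with
  | nil => simp [numPrefixSum]
  | cons e rest ih =>
      cases e with
      | op b => simp [numPrefixSum]
      | num n =>
          have h1 : 0 < n := h n (by simp)
          have h2 : 0 ≤ numPrefixSum rest := ih (fun m hm => h m (List.mem_cons_of_mem _ hm))
          simp only [numPrefixSum]; omega

theorem numPrefixSum_pos (S : List AElem) (h : PosNums S) (hh : headIsOp S = false)
    (hne : afterNums S ≠ []) : 0 < numPrefixSum S := by
  cases S with
  | nil => simp [afterNums] at hne
  | cons e rest =>
      cases e with
      | op b => simp [headIsOp] at hh
      | num n =>
          have h1 : 0 < n := h n (by simp)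
          have h2 : 0 ≤ numPrefixSum rest :=
            numPrefixSum_nonneg rest (fun m hm => h m (List.mem_cons_of_mem _ hm))
          simp only [numPrefixSum]; omega

theorem headIsOp_true_prefix (S : List AElem) (hh : headIsOp S = true) :
    afterNums S = S ∧ numPrefixSum S = 0 := by
  cases S with
  | nil => simp [headIsOp] at hh
  | cons e rest => cases e with
      | op b => exact ⟨rfl, rfl⟩
      | num n => simp [headIsOp] at hh

theorem finishA_eq (L : List AElem) (acc : Int) :
    finishA L acc = if opens L = [] then acc + sumNums L else 0 := by
  induction L generalizing acc with
  | nil => simp [finishA, opens, sumNums]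
  | cons e rest ih => cases e with
      | op b => simp [finishA, opens]
      | num n =>
          simp only [finishA, opens, sumNums, ih]
          split_ifs with h <;> [ring_nf; rfl]

theorem opens_append (S T : List AElem) : opens (S ++ T) = opens S ++ opens T := by
  induction S with
  | nil => rfl
  | cons e rest ih => cases e <;> simp [opens, ih]

theorem opens_reverse (S : List AElem) : opens S.reverse = (opens S).reverse := by
  induction S with
  | nil => rfl
  | cons e rest ih => cases e <;> simp [opens, List.reverse_cons, opens_append, ih]

theorem sumNums_append (S T : List AElem) : sumNums (S ++ T) = sumNums S + sumNums T := by
  induction S with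
  | nil => simp [sumNums]
  | cons e rest ih => cases e <;> simp [sumNums, ih] <;> ring

theorem sumNums_reverse (S : List AElem) : sumNums S.reverse = sumNums S := by
  induction S with
  | nil => rfl
  | cons e rest ih => cases e <;> simp [sumNums, List.reverse_cons, sumNums_append, ih] <;> ring

theorem valA_of_opens_nil (S : List AElem) (h : opens S = []) : valA S = sumNums S := by
  induction S with
  | nil => rfl
  | cons e rest ih => cases e with
      | op b => simp [opens] at h
      | num n =>
          simp only [opens] at h
          simp [valA, sumNums, h, ih h, wprod]

theorem mem_of_mem_afterNums (S : List AElem) (e : AElem) (h : e ∈ afterNums S) : e ∈ S := by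
  induction S with
  | nil => simpa [afterNums] using h
  | cons f r ih =>
      cases f with
      | op b => simpa [afterNums] using h
      | num k => exact List.mem_cons_of_mem _ (ih (by simpa [afterNums] using h))

theorem popLoopA_of_afterNums_nil (b : Bool) (S : List AElem) (t : Int)
    (h : afterNums S = []) : popLoopA b S t = none := by
  induction S generalizing t with
  | nil => rfl
  | cons e r ih =>
      cases e with
      | op b' => simp [afterNums] at h
      | num n => exact ih (t + n) (by simpa [afterNums] using h)

theorem popLoopA_of_afterNums_op (b b' : Bool) (S rest : List AElem) (t : Int)
    (h : afterNums S = AElem.op b' :: rest) :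
    popLoopA b S t =
      if b' = b then
        some (AElem.num (if t + numPrefixSum S = 0 then (if b then 2 else 3)
                         else (t + numPrefixSum S) * (if b then 2 else 3)) :: rest)
      else none := by
  induction S generalizing t with
  | nil => simp [afterNums] at h
  | cons e r ih =>
      cases e with
      | op b'' =>
          have h' : b'' = b' ∧ r = rest := by simpa [afterNums] using h
          obtain ⟨rfl, rfl⟩ := h'
          simp [popLoopA, numPrefixSum]
      | num n =>
          have h' : afterNums r = AElem.op b' :: rest := by simpa [afterNums] using h
          have := ih (t + n) h'
          simp only [popLoopA, this, numPrefixSum]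
          have harith : t + n + numPrefixSum r = t + (n + numPrefixSum r) := by ring
          rw [harith]

theorem afterNums_of_opens_cons (S : List AElem) (c : Char) (l : List Char)
    (h : opens S = c :: l) :
    ∃ b' rest, afterNums S = AElem.op b' :: rest ∧
      c = (if b' then '(' else '[') ∧ l = opens rest := by
  induction S with
  | nil => simp [opens] at h
  | cons e r ih =>
      cases e with
      | op b'' =>
          simp only [opens, List.cons.injEq] at h
          exact ⟨b'', r, rfl, h.1.symm, h.2.symm⟩
      | num n =>
          obtain ⟨b', rest, h1, h2, h3⟩ := ih (by simpa [opens] using h)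
          exact ⟨b', rest, by simpa [afterNums] using h1, h2, h3⟩

theorem afterNums_nil_of_opens_nil (S : List AElem) (h : opens S = []) :
    afterNums S = [] := by
  induction S with
  | nil => rfl
  | cons e r ih =>
      cases e with
      | op b => simp [opens] at h
      | num n => simpa [afterNums] using ih (by simpa [opens] using h)

-- the effect of one closing-bracket event (b = true for ')', false for ']'): empty case
theorem close_eq_nil (cs : List Char) (b : Bool) (S : List AElem) (h : opens S = []) :
    (match popLoopA b S 0 with
     | none => 0
     | some s => loopA cs s) = 0 := by
  rw [popLoopA_of_afterNums_nil b S 0 (afterNums_nil_of_opens_nil S h)]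

-- the effect of one closing-bracket event when an open bracket is on the B-stack,
-- assuming the induction hypothesis for the rest of the input
theorem close_eq_cons (cs : List Char) (b : Bool) (S : List AElem) (c : Char) (l : List Char)
    (hpos : PosNums S) (hO : opens S = c :: l)
    (ih : ∀ S', PosNums S' → loopA cs S' = loopB cs (opens S') (wprod (opens S')) (valA S') (headIsOp S')) :
    (match popLoopA b S 0 with
     | none => 0
     | some s => loopA cs s) =
    (if c = (if b then '(' else '[') then
       loopB cs l (PySem.Int.floordiv (wprod (opens S)) (if b then 2 else 3))
         (if headIsOp S = true then valA S + wprod (opens S) else valA S) false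
     else 0) := by
  obtain ⟨b', rest, h, hc, hl⟩ := afterNums_of_opens_cons S c l hO
  rw [popLoopA_of_afterNums_op b b' S rest 0 h]
  by_cases hbb : b' = b
  · subst hbb
    rw [if_pos rfl, if_pos hc]
    show loopA cs (AElem.num _ :: rest) = _
    have hnn : 0 ≤ numPrefixSum S := numPrefixSum_nonneg S hpos
    have hposrest : PosNums (AElem.num (if 0 + numPrefixSum S = 0 then (if b' then 2 else 3)
        else (0 + numPrefixSum S) * (if b' then 2 else 3)) :: rest) := by
      intro m hm
      rcases List.mem_cons.mp hm with heq | hmem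
      · cases heq
        split_ifs with h0 <;> cases b' <;> omega
      · exact hpos m (mem_of_mem_afterNums S _ (by rw [h]; exact List.mem_cons_of_mem _ hmem))
    have hIH := ih _ hposrest
    simp only [opens, valA, headIsOp] at hIH
    rw [hIH]
    have hW : wprod (opens S) = (if b' then 2 else 3) * wprod (opens rest) := by
      rw [hO, hc]; cases b' <;> simp [wprod, hl]
    have harg1 : PySem.Int.floordiv (wprod (opens S)) (if b' then 2 else 3) = wprod (opens rest) := by
      rw [hW, PySem.Int.floordiv_eq_ediv_of_pos (by cases b' <;> norm_num)]
      exact Int.mul_ediv_cancel_left _ (by cases b' <;> norm_num)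
    have hval : valA S = numPrefixSum S * ((if b' then 2 else 3) * wprod (opens rest)) + valA rest := by
      rw [valA_decomp S, h, hW]
      simp [valA]
    have harg2 : (if headIsOp S = true then valA S + wprod (opens S) else valA S)
        = (if 0 + numPrefixSum S = 0 then (if b' then 2 else 3)
           else (0 + numPrefixSum S) * (if b' then 2 else 3)) * wprod (opens rest) + valA rest := by
      by_cases hlf : headIsOp S = true
      · obtain ⟨-, hz⟩ := headIsOp_true_prefix S hlf
        rw [hlf, hW, hval, hz]
        simp
        try ring
      · have hlf' : headIsOp S = false := by simpa using hlf
        have hpz : 0 < numPrefixSum S :=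
          numPrefixSum_pos S hpos hlf' (by rw [h]; simp)
        rw [hlf', hval, if_neg (by omega : ¬ (0 + numPrefixSum S = 0))]
        simp only [Bool.false_eq_true, if_false]
        ring
    rw [harg1, harg2, hl]
  · rw [if_neg hbb, if_neg (by rw [hc]; cases b <;> cases b' <;> simp_all)]

-- main invariant lemma: A's loop over the remaining characters equals B's loop on the abstracted state
theorem loop_eq (cs : List Char) (S : List AElem) (hpos : PosNums S) :
    loopA cs S = loopB cs (opens S) (wprod (opens S)) (valA S) (headIsOp S) := by
  induction cs generalizing S with
  | nil =>
      simp only [loopA, loopB]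
      rw [finishA_eq]
      rcases h : opens S with _ | ⟨c, r⟩
      · rw [show opens S.reverse = [] from by rw [opens_reverse, h]; rfl]
        simp [sumNums_reverse, valA_of_opens_nil S h, h]
      · rw [show opens S.reverse = (opens S).reverse from opens_reverse S, h]
        simp
  | cons c cs ih =>
      by_cases h1 : c = '('
      · subst h1
        have hkey := ih (AElem.op true :: S) (fun n hn => hpos n (by simpa using hn))
        simp only [loopA, loopB]
        rw [hkey]
        simp [opens, wprod, valA, headIsOp, mul_comm]
      · by_cases h2 : c = '['
        · subst h2
          have hkey := ih (AElem.op false :: S) (fun n hn => hpos n (by simpa using hn))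
          simp only [loopA, loopB]
          rw [hkey]
          simp [opens, wprod, valA, headIsOp, mul_comm]
        · by_cases h3 : c = ')'
          · subst h3
            simp only [loopA, loopB]
            rcases hO : opens S with _ | ⟨c, r⟩
            · rw [close_eq_nil cs true S hO]
              simp
            · rw [close_eq_cons cs true S c r hpos hO ih, hO]
              by_cases hc : c = '('
              · subst hc; simp
              · rw [if_neg (by simpa using hc)]
                split <;> simp_all
          · by_cases h4 : c = ']'
            · subst h4
              simp only [loopA, loopB]
              rcases hO : opens S with _ | ⟨c, r⟩
              · rw [close_eq_nil cs false S hO]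
                simp
              · rw [close_eq_cons cs false S c r hpos hO ih, hO]
                by_cases hc : c = '['
                · subst hc; simp
                · rw [if_neg (by simpa using hc)]
                  split <;> simp_all
            · simp only [loopA, loopB, if_neg h1, if_neg h2, if_neg h3, if_neg h4]
              exact ih S hpos

-- ===== VERDICT (by name: the statement is the Claim_ definition above) =====
theorem cal_stack_spec : Claim_equal_cal_stack := by
  intro data _
  unfold Spec_cal_stack cal_stack cal_stack_alt
  simpa [opens, wprod, valA, headIsOp] using
    loop_eq data.toList [] (fun n hn => by simp at hn)
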